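-- pv_equiv track=rewrite | github.com/pypi-data/pypi-mirror-67 | packages/mmanalyser/mmanalyser-0.3.0-py3-none-any.whl/mmanalyser/expression_analyser.py | __get_repeat_record_by_offset
-- ===== SOURCE A (Python) =====
-- def __get_repeat_record_by_offset(text, offset=1):
--     assert offset > 0
--     length = len(text)
--     repeat_record = []
--     word = text[0:offset] if length > 0 else ''
--     i = offset * 2
--     count = 1
--     while i < length + 1:
--         if word == text[i - offset:i]:
--             count += 1
--         else:
--             if count > 1:
--                 repeat_record.append(count)
--             i = i - offset + 1
--             count = 1
--             word = text[i - offset:i]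
--         i = i + offset
--     if count > 1:
--         repeat_record.append(count)
--     return repeat_record
-- ===== SOURCE B (Python) =====
-- def __get_repeat_record_by_offset(text, offset=1):
--     assert offset > 0
--     n = len(text)
--     # run[q] = length of the maximal stretch starting at q with text[q+k] == text[q+k+offset]
--     run_rev = []
--     nxt = 0
--     for q in range(n - offset - 1, -1, -1):
--         nxt = nxt + 1 if text[q] == text[q + offset] else 0
--         run_rev.append(nxt)
--     run = run_rev[::-1]
--     out = []
--     s = 0
--     while s + 2 * offset <= n:
--         bound = (n - s) // offset - 1
--         m = run[s] if s < len(run) else 0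
--         c = 1 + min(m // offset, bound)
--         if c > 1:
--             out.append(c)
--         if bound <= m // offset:
--             break
--         s = s + (c - 1) * offset + 1
--     return out
-- ===== Notes on version B (the rewrite author's own statement) =====
-- stated objective: alternative
-- what changed: B replaces A's repeated O(offset) slice comparisons over a sliding window by a precomputed self-match run-length array (text[q]==text[q+offset] runs, built right-to-left in one pass), so each whole repeat-run is resolved with one O(1) lookup and two divisions instead of re-slicing; worst-case cost drops from O(n*offset) to O(n).
import Mathlib
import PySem

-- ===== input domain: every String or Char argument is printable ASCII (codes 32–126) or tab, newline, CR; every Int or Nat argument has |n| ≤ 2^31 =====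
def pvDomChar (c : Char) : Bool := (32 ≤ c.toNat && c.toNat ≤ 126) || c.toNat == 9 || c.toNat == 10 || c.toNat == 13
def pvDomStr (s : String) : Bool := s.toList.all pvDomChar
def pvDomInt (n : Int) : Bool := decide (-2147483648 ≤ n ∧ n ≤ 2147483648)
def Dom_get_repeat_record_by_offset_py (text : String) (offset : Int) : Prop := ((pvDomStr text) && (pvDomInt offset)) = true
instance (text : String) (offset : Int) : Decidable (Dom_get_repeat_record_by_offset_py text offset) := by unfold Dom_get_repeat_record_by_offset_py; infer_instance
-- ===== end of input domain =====

-- B replaces A's sliding window of repeated slice comparisons by a precomputed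
-- self-match run-length array, so each block comparison becomes one O(1) lookup (objective: alternative O(n) algorithm).

-- ===== PORT A =====
-- while loop of A; fuel only makes the recursion structural (never exhausted when offset > 0)
def pvALoop (t : List Char) (n offset : Int) : Nat → Int → Int → List Char → List Int → List Int
  | fuel, i, count, word, acc =>
    if i < n + 1 then
      match fuel with
      | 0 => acc
      | Nat.succ fuel' =>
        if word = PySem.List.slice t (some (i - offset)) (some i) then
          pvALoop t n offset fuel' (i + offset) (count + 1) word acc
        else
          let acc' := if count > 1 then acc ++ [count] else acc
          let i' := i - offset + 1
          pvALoop t n offset fuel' (i' + offset) 1 (PySem.List.slice t (some (i' - offset)) (some i')) acc'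
    else if count > 1 then acc ++ [count] else acc

def get_repeat_record_by_offset_py (text : String) (offset : Int) : List Int :=
  let t := text.toList
  let length : Int := t.length
  let word := if length > 0 then PySem.List.slice t (some 0) (some offset) else []
  pvALoop t length offset (t.length + 1) (offset * 2) 1 word []

-- ===== PORT B =====
-- for q in range(n - offset - 1, -1, -1): nxt = nxt + 1 if text[q] == text[q+offset] else 0; run_rev.append(nxt)
def pvRunFold (t : List Char) (offset n : Int) : List Int × Int :=
  (PySem.List.pyRange (n - offset - 1) (-1) (-1)).foldl
    (fun (st : List Int × Int) q =>
      let nxt := if PySem.List.pyGetD t q ' ' == PySem.List.pyGetD t (q + offset) ' ' then st.2 + 1 else 0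
      (st.1 ++ [nxt], nxt)) ([], 0)

-- while loop of B; fuel only makes the recursion structural (never exhausted when offset > 0)
def pvBLoop (run : List Int) (n offset : Int) : Nat → Int → List Int → List Int
  | fuel, s, acc =>
    if s + 2 * offset ≤ n then
      match fuel with
      | 0 => acc
      | Nat.succ fuel' =>
        let bound := PySem.Int.floordiv (n - s) offset - 1
        let m := if s < (run.length : Int) then PySem.List.pyGetD run s 0 else 0
        let c := 1 + min (PySem.Int.floordiv m offset) bound
        let acc' := if c > 1 then acc ++ [c] else acc
        if bound ≤ PySem.Int.floordiv m offset then acc'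
        else pvBLoop run n offset fuel' (s + (c - 1) * offset + 1) acc'
    else acc

def get_repeat_record_by_offset_py_alt (text : String) (offset : Int) : List Int :=
  let t := text.toList
  let n : Int := t.length
  let run := (pvRunFold t offset n).1.reverse   -- run_rev[::-1]
  pvBLoop run n offset (t.length + 1) 0 []

-- ===== PRECONDITION & SPEC =====
-- Pre_ excludes exactly offset ≤ 0, where A's `assert offset > 0` raises AssertionError (B asserts identically).
def Pre_get_repeat_record_by_offset_py (text : String) (offset : Int) : Prop := 0 < offset
instance (text : String) (offset : Int) : Decidable (Pre_get_repeat_record_by_offset_py text offset) := by unfold Pre_get_repeat_record_by_offset_py; infer_instance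
def pvWitness_get_repeat_record_by_offset_py : String × Int := ("abab", 2)

def Spec_get_repeat_record_by_offset_py (text : String) (offset : Int) (out : List Int) : Prop := out = get_repeat_record_by_offset_py_alt text offset
instance (text : String) (offset : Int) (out : List Int) : Decidable (Spec_get_repeat_record_by_offset_py text offset out) := by unfold Spec_get_repeat_record_by_offset_py; infer_instance

-- ===== CLAIM (what is proved, stated in full; the proofs are below) =====
def Claim_equal_get_repeat_record_by_offset_py : Prop := ∀ (text : String) (offset : Int), Dom_get_repeat_record_by_offset_py text offset → Pre_get_repeat_record_by_offset_py text offset → Spec_get_repeat_record_by_offset_py text offset (get_repeat_record_by_offset_py text offset)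

-- ===== LEMMAS AND PROOFS =====

-- d: adjacent self-match bits; pvM s: length of the true-run of d starting at s
def pvD (t : List Char) (off : Nat) : List Bool := List.zipWith (fun a b => a == b) t (t.drop off)
def pvM (t : List Char) (off s : Nat) : Nat := (((pvD t off).drop s).takeWhile id).length

-- common functional spec of both while-loops
def pvSpecLoop (t : List Char) (off : Nat) (s : Nat) : List Int :=
  if s + 2 * off ≤ t.length then
    let bound := (t.length - s) / off - 1
    let q := pvM t off s / off
    let c := 1 + min q bound
    if bound ≤ q then (if 1 < c then [(c : Int)] else [])
    else (if 1 < c then [(c : Int)] else []) ++ pvSpecLoop t off (s + (c - 1) * off + 1)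
  else []
termination_by t.length - s
decreasing_by
  rename_i h hlt
  simp only [bound, q] at hlt
  have hoff : 0 < off := by
    rcases Nat.eq_zero_or_pos off with h0 | h0
    · exact absurd (by simp [h0]) hlt
    · exact h0
  have h4 : s < t.length := by omega
  have h5 : s < s + (1 + min (pvM t off s / off) ((t.length - s) / off - 1) - 1) * off + 1 := by omega
  omega

theorem pvD_length (t : List Char) (off : Nat) : (pvD t off).length = t.length - off := by
  simp [pvD]
theorem pvM_zero_of_ge (t : List Char) (off s : Nat) (h : t.length - off ≤ s) : pvM t off s = 0 := by
  have : (pvD t off).length ≤ s := by rw [pvD_length]; exact h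
  simp [pvM, List.drop_of_length_le this]
-- takeWhile characterisation
theorem takeWhile_ge_iff (l : List Bool) (k : Nat) (hk : k ≤ l.length) :
    k ≤ (l.takeWhile id).length ↔ ∀ j, j < k → l.getD j false = true := by
  induction l generalizing k with
  | nil => simp at hk; simp [hk]
  | cons a l ih =>
    cases k with
    | zero => simp
    | succ k =>
      cases a with
      | false =>
        simp [List.takeWhile]
        exact ⟨0, by omega, rfl⟩
      | true =>
        simp only [List.takeWhile, id] at *
        simp only [List.length_cons]
        constructor
        · intro h j hj
          cases j with
          | zero => rfl
          | succ j => exact ((ih k (by simpa using hk)).mp (by omega)) j (by omega)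
        · intro h
          have := (ih k (by simpa using hk)).mpr (fun j hj => h (j+1) (by omega))
          omega
theorem getD_drop' (l : List Bool) (s j : Nat) (d : Bool) :
    (l.drop s).getD j d = l.getD (s+j) d := by
  simp [List.getD, List.getElem?_drop]
theorem pvD_getD (t : List Char) (off q : Nat) (h : q < t.length - off) :
    (pvD t off).getD q false = (t.getD q ' ' == t.getD (q + off) ' ') := by
  have hq : q < (pvD t off).length := by rw [pvD_length]; exact h
  rw [List.getD_eq_getElem _ _ hq]
  have h1 : q < t.length := by omega
  have h2 : q < (t.drop off).length := by simp; omega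
  simp [pvD, List.getElem_zipWith, List.getElem_drop, List.getD,
    List.getElem?_eq_getElem h1, List.getElem?_eq_getElem (show off + q < t.length by omega),
    Nat.add_comm]
theorem pvM_ge_iff (t : List Char) (off s k : Nat) (hk : s + k ≤ t.length - off) :
    k ≤ pvM t off s ↔ ∀ j, j < k → t.getD (s + j) ' ' = t.getD (s + j + off) ' ' := by
  rw [pvM, takeWhile_ge_iff _ _ (by simp [pvD_length]; omega)]
  constructor
  · intro h j hj
    have := h j hj
    rw [getD_drop' _, pvD_getD t off (s+j) (by omega)] at this
    exact beq_iff_eq.mp this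
  · intro h j hj
    rw [getD_drop' _, pvD_getD t off (s+j) (by omega)]
    exact beq_iff_eq.mpr (h j hj)
theorem take_drop_eq_iff (t : List Char) (a b len : Nat) (ha : a + len ≤ t.length) (hb : b + len ≤ t.length) :
    ((t.drop a).take len = (t.drop b).take len) ↔ ∀ j, j < len → t.getD (a + j) ' ' = t.getD (b + j) ' ' := by
  constructor
  · intro h j hj
    rw [List.getD_eq_getElem _ _ (show a + j < t.length by omega),
        List.getD_eq_getElem _ _ (show b + j < t.length by omega)]
    have hja : j < ((t.drop a).take len).length := by simp; omega
    have hjb : j < ((t.drop b).take len).length := by simp; omega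
    have := congrArg (fun l => l[j]?) h
    simp only [List.getElem?_eq_getElem hja, List.getElem?_eq_getElem hjb, Option.some.injEq] at this
    simpa [List.getElem_take, List.getElem_drop] using this
  · intro h
    apply List.ext_getElem (by simp; omega)
    intro j h1 h2
    have hj : j < len := by simp at h1; omega
    have hh := h j hj
    rw [List.getD_eq_getElem _ _ (show a + j < t.length by omega),
        List.getD_eq_getElem _ _ (show b + j < t.length by omega)] at hh
    simpa [List.getElem_take, List.getElem_drop] using hh
theorem chainStep (t : List Char) (off s R : Nat)
    (hall : ∀ q, s ≤ q → q < s + R → t.getD q ' ' = t.getD (q + off) ' ') :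
    ∀ (k : Nat), k * off ≤ R → ∀ j, j < off → t.getD (s + j) ' ' = t.getD (s + k * off + j) ' ' := by
  intro k
  induction k with
  | zero => simp
  | succ k ih =>
    intro hk j hj
    have h1 : k * off ≤ R := by
      calc k * off ≤ (k+1) * off := by nlinarith
        _ ≤ R := hk
    have h2 := ih h1 j hj
    have h3 : s + k * off + j < s + R := by nlinarith
    have h4 := hall (s + k * off + j) (by omega) h3
    rw [h2, h4]
    ring_nf
theorem blockEq_iff (t : List Char) (off s c : Nat) (hoff : 1 ≤ off) (hc : 1 ≤ c)
    (hfit : s + (c + 1) * off ≤ t.length) (hprev : (c - 1) * off ≤ pvM t off s) :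
    ((t.drop s).take off = (t.drop (s + c * off)).take off) ↔ c * off ≤ pvM t off s := by
  have hcc : (c - 1) * off + off = c * off := by
    have : c - 1 + 1 = c := by omega
    calc (c-1) * off + off = (c - 1 + 1) * off := by ring
      _ = c * off := by rw [this]
  have hfit2 : s + c * off + off ≤ t.length := by nlinarith
  have hprev' := (pvM_ge_iff t off s ((c-1)*off) (by omega)).mp hprev
  rw [take_drop_eq_iff t s (s + c*off) off (by nlinarith) (by omega)]
  rw [pvM_ge_iff t off s (c*off) (by omega)]
  have hchain := chainStep t off s ((c-1)*off)
    (fun q hq1 hq2 => by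
      have := hprev' (q - s) (by omega)
      simpa [Nat.add_sub_cancel' hq1] using this)
    (c-1) (le_refl _)
  constructor
  · intro h j hj
    by_cases hsmall : j < (c-1) * off
    · exact hprev' j hsmall
    · -- j = (c-1)*off + r
      set r := j - (c-1)*off with hr
      have hrlt : r < off := by omega
      have e1 := hchain r hrlt          -- t.getD (s+r) = t.getD (s+(c-1)off+r)
      have e2 := h r hrlt               -- t.getD (s+r) = t.getD (s+c*off+r)
      have hj' : s + j = s + (c-1)*off + r := by omega
      rw [hj', show s + (c-1)*off + r + off = s + c * off + r from by omega, ← e1, e2]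
  · intro h j hj
    -- chain all the way to c with R = c*off
    have hall2 : ∀ q, s ≤ q → q < s + c * off → t.getD q ' ' = t.getD (q + off) ' ' := by
      intro q hq1 hq2
      have := h (q - s) (by omega)
      simpa [Nat.add_sub_cancel' hq1] using this
    have := chainStep t off s (c*off) hall2 c (le_refl _) j hj
    exact this

theorem pvM_step (t : List Char) (off k : Nat) (h : k < t.length - off) :
    pvM t off k = if t.getD k ' ' == t.getD (k + off) ' ' then pvM t off (k + 1) + 1 else 0 := by
  have hk : k < (pvD t off).length := by rw [pvD_length]; exact h
  have hdrop : (pvD t off).drop k = (pvD t off)[k] :: (pvD t off).drop (k + 1) :=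
    List.drop_eq_getElem_cons hk
  have hgd : (pvD t off)[k] = (t.getD k ' ' == t.getD (k + off) ' ') := by
    rw [← List.getD_eq_getElem _ false hk, pvD_getD t off k h]
  rw [pvM, hdrop, hgd]
  by_cases hb : t.getD k ' ' = t.getD (k + off) ' '
  · simp only [List.getD] at hb
    simp [pvM, List.takeWhile, List.getD, hb]
  · simp only [List.getD] at hb
    have hbb : (t[k]?.getD ' ' == t[k + off]?.getD ' ') = false := beq_eq_false_iff_ne.mpr hb
    simp [List.takeWhile, List.getD, hbb, hb]

theorem runFold_general (t : List Char) (off : Nat) (hoff : 1 ≤ off) :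
    ∀ (k : Nat), k ≤ t.length - off → ∀ (A0 : List Int) (z : Int), z = (pvM t off k : Int) →
    (PySem.List.pyRange ((k : Int) - 1) (-1) (-1)).foldl
      (fun (st : List Int × Int) q =>
        let nxt := if PySem.List.pyGetD t q ' ' == PySem.List.pyGetD t (q + (off : Int)) ' ' then st.2 + 1 else 0
        (st.1 ++ [nxt], nxt)) (A0, z)
    = (A0 ++ ((List.range k).map (fun q => (pvM t off q : Int))).reverse, (pvM t off 0 : Int)) := by
  intro k
  induction k with
  | zero =>
    intro _ A0 z hz
    subst hz
    rw [PySem.List.pyRange_neg_one_eq_nil (by omega)]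
    simp
  | succ k ih =>
    intro hk A0 z hz
    subst hz
    have ha : (((k + 1 : Nat)) : Int) - 1 = (k : Int) := by push_cast; ring
    rw [ha, PySem.List.pyRange_neg_one_cons (show (-1 : Int) < (k : Int) by omega), List.foldl_cons]
    have e2 : (k : Int) + (off : Int) = ((k + off : Nat) : Int) := by push_cast; ring
    have hnxt : (if PySem.List.pyGetD t ((k : Nat) : Int) ' ' == PySem.List.pyGetD t ((k : Int) + (off : Int)) ' '
        then ((pvM t off (k + 1) : Nat) : Int) + 1 else 0) = ((pvM t off k : Nat) : Int) := by
      rw [e2, PySem.List.pyGetD_natCast, PySem.List.pyGetD_natCast,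
        pvM_step t off k (by omega)]
      by_cases hb : t.getD k ' ' == t.getD (k + off) ' ' <;> simp [hb]
    simp only [hnxt]
    rw [ih (by omega) (A0 ++ [((pvM t off k : Nat) : Int)]) _ rfl]
    simp [List.range_succ]

theorem runFold_eq (t : List Char) (off : Nat) (hoff : 1 ≤ off) :
    (pvRunFold t (off : Int) (t.length : Int)).1.reverse
      = (List.range (t.length - off)).map (fun q => (pvM t off q : Int)) := by
  by_cases hno : off ≤ t.length
  · have ha : (t.length : Int) - (off : Int) - 1 = ((t.length - off : Nat) : Int) - 1 := by
      push_cast [hno]; ring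
    have h0 : pvM t off (t.length - off) = 0 := pvM_zero_of_ge t off _ (le_refl _)
    rw [pvRunFold, ha,
      runFold_general t off hoff (t.length - off) (le_refl _) [] 0 (by simp [h0])]
    simp
  · rw [pvRunFold, PySem.List.pyRange_neg_one_eq_nil (by omega : (t.length : Int) - (off : Int) - 1 ≤ -1)]
    have : t.length - off = 0 := by omega
    simp [this]

theorem pvBLoop_eq_spec (t : List Char) (off : Nat) (hoff : 1 ≤ off) :
    ∀ (fuel : Nat) (s : Nat) (acc : List Int), t.length + 1 ≤ fuel + s →
    pvBLoop ((List.range (t.length - off)).map (fun q => (pvM t off q : Int)))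
        (t.length : Int) (off : Int) fuel (s : Int) acc
      = acc ++ pvSpecLoop t off s := by
  intro fuel
  induction fuel with
  | zero =>
    intro s acc hfuel
    rw [pvBLoop, pvSpecLoop, if_neg (by push_cast; omega), if_neg (by omega)]
    simp
  | succ fuel' ih =>
    intro s acc hfuel
    by_cases hcond : s + 2 * off ≤ t.length
    · rw [pvBLoop, if_pos (by push_cast; omega), pvSpecLoop, if_pos hcond]
      have hdiv2 : 2 ≤ (t.length - s) / off := by
        rw [Nat.le_div_iff_mul_le (by omega)]
        omega
      have hbound : PySem.Int.floordiv ((t.length : Int) - (s : Int)) (off : Int) - 1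
          = (((t.length - s) / off - 1 : Nat) : Int) := by
        rw [show ((t.length : Int) - (s : Int)) = ((t.length - s : Nat) : Int) from by
          push_cast [Nat.cast_sub (by omega : s ≤ t.length)]; ring]
        rw [PySem.Int.floordiv_natCast]
        omega
      have hm : (if (s : Int) < (((List.range (t.length - off)).map (fun q => (pvM t off q : Int))).length : Int)
          then PySem.List.pyGetD ((List.range (t.length - off)).map (fun q => (pvM t off q : Int))) (s : Int) 0
          else 0) = ((pvM t off s : Nat) : Int) := by
        simp only [List.length_map, List.length_range]
        by_cases hs : s < t.length - off
        · rw [if_pos (by exact_mod_cast hs), PySem.List.pyGetD_natCast,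
            List.getD_eq_getElem _ _ (by simpa using hs)]
          simp
        · rw [if_neg (by push_cast; omega), pvM_zero_of_ge t off s (by omega)]
          simp
      have hq : PySem.Int.floordiv ((pvM t off s : Nat) : Int) (off : Int)
          = ((pvM t off s / off : Nat) : Int) := PySem.Int.floordiv_natCast _ _
      simp only [hbound, hm, hq]
      set bN := (t.length - s) / off - 1 with hbN
      set qN := pvM t off s / off with hqN
      have hbN1 : 1 ≤ bN := by omega
      clear_value bN qN
      have hc : (1 : Int) + min (qN : Int) (bN : Int) = ((1 + min qN bN : Nat) : Int) := by
        push_cast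
        omega
      by_cases hbr : bN ≤ qN
      · rw [if_pos (by exact_mod_cast hbr), if_pos hbr]
        by_cases h1c : 1 < 1 + min qN bN
        · rw [if_pos (by rw [hc]; exact_mod_cast h1c), if_pos h1c, hc]
        · rw [if_neg (by rw [hc]; exact_mod_cast h1c), if_neg h1c]
          simp
      · rw [if_neg (by exact_mod_cast hbr), if_neg hbr]
        have hmin : 1 + min qN bN - 1 = min qN bN := by omega
        have hs' : (s : Int) + ((1 : Int) + min (qN : Int) (bN : Int) - 1) * (off : Int) + 1
            = ((s + (1 + min qN bN - 1) * off + 1 : Nat) : Int) := by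
          rw [hmin]
          push_cast
          ring
        rw [hs', hc]
        by_cases h1c : 1 < 1 + min qN bN
        · rw [if_pos (by exact_mod_cast h1c), if_pos h1c, ih _ _ (by omega)]
          simp
        · rw [if_neg (by exact_mod_cast h1c), if_neg h1c, ih _ _ (by omega)]
          simp
    · rw [pvBLoop, pvSpecLoop, if_neg (by push_cast; omega), if_neg (by omega)]
      simp

theorem pvALoop_eq_spec (t : List Char) (off : Nat) (hoff : 1 ≤ off) :
    ∀ (fuel : Nat) (s c : Nat) (acc : List Int), 1 ≤ c →
    (c - 1) * off ≤ pvM t off s →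
    (1 < c → s + c * off ≤ t.length) →
    t.length + 1 < fuel + (s + (c + 1) * off) →
    pvALoop t (t.length : Int) (off : Int) fuel ((s : Int) + ((c : Int) + 1) * (off : Int)) (c : Int)
        ((t.drop s).take off) acc
      = acc ++ pvSpecLoop t off s := by
  have hexit : ∀ (s c : Nat) (acc : List Int), 1 ≤ c → (c - 1) * off ≤ pvM t off s →
      (1 < c → s + c * off ≤ t.length) → ¬ (s + (c + 1) * off ≤ t.length) →
      (if (c : Int) > 1 then acc ++ [(c : Int)] else acc) = acc ++ pvSpecLoop t off s := by
    intro s c acc hc hprev hfit hcont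
    by_cases h1c : 1 < c
    · have hfitc : s + c * off ≤ t.length := hfit h1c
      have hdiv : (t.length - s) / off = c := by
        apply Nat.div_eq_of_lt_le
        · omega
        · have : (c + 1) * off = c * off + off := by ring
          omega
      have h2off : s + 2 * off ≤ t.length := by
        have : 2 * off ≤ c * off := Nat.mul_le_mul_right off (by omega)
        omega
      have hq1 : c - 1 ≤ pvM t off s / off := by
        rw [Nat.le_div_iff_mul_le hoff]
        exact hprev
      have hmin : min (pvM t off s / off) (c - 1) = c - 1 := by omega
      have hcc : 1 + (c - 1) = c := by omega
      rw [pvSpecLoop, if_pos h2off, hdiv, if_pos (show (c : Int) > 1 from by exact_mod_cast h1c)]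
      simp only []
      rw [if_pos hq1, hmin, hcc, if_pos h1c]
    · have hc1 : c = 1 := by omega
      subst hc1
      have h2 : ¬ (s + 2 * off ≤ t.length) := by
        intro hx
        refine hcont ?_
        have : (1 + 1) * off = 2 * off := by ring
        omega
      rw [pvSpecLoop, if_neg h2, if_neg (by norm_num)]
      simp
  intro fuel
  induction fuel with
  | zero =>
    intro s c acc hc hprev hfit hfuel
    have hcont : ¬ (s + (c + 1) * off ≤ t.length) := by omega
    rw [pvALoop, if_neg (by
        have hQ : ((c : Int) + 1) * (off : Int) = ((c * off : Nat) : Int) + ((off : Nat) : Int) := by push_cast; ring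
        have hP : (c + 1) * off = c * off + off := by ring
        omega)]
    exact hexit s c acc hc hprev hfit hcont
  | succ fuel' ih =>
    intro s c acc hc hprev hfit hfuel
    by_cases hcont : s + (c + 1) * off ≤ t.length
    · rw [pvALoop, if_pos (by
        have hQ : ((c : Int) + 1) * (off : Int) = ((c * off : Nat) : Int) + ((off : Nat) : Int) := by push_cast; ring
        have hP : (c + 1) * off = c * off + off := by ring
        omega)]
      have hsl : PySem.List.slice t (some ((s : Int) + ((c : Int) + 1) * (off : Int) - (off : Int)))
          (some ((s : Int) + ((c : Int) + 1) * (off : Int)))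
          = (t.drop (s + c * off)).take off := by
        rw [show (s : Int) + ((c : Int) + 1) * (off : Int) - (off : Int) = ((s + c * off : Nat) : Int) from by push_cast; ring,
            show (s : Int) + ((c : Int) + 1) * (off : Int) = ((s + c * off : Nat) : Int) + ((off : Nat) : Int) from by push_cast; ring]
        exact PySem.List.slice_natCast_add t _ _
      rw [hsl]
      by_cases heq : (t.drop s).take off = (t.drop (s + c * off)).take off
      · rw [if_pos heq]
        have hMc : c * off ≤ pvM t off s :=
          (blockEq_iff t off s c hoff hc hcont hprev).mp heq
        have harg : (s : Int) + ((c : Int) + 1) * (off : Int) + (off : Int)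
            = (s : Int) + (((c + 1 : Nat) : Int) + 1) * (off : Int) := by push_cast; ring
        have hcc : (c : Int) + 1 = ((c + 1 : Nat) : Int) := by push_cast; ring
        rw [harg, hcc, ih s (c + 1) acc (by omega) (by simpa using hMc) (fun _ => hcont)
          (by
            have e : (c + 1 + 1) * off = (c + 1) * off + off := by ring
            omega)]
      · rw [if_neg heq]
        simp only []
        have hMlt : pvM t off s < c * off := by
          by_contra hMc
          exact heq ((blockEq_iff t off s c hoff hc hcont hprev).mpr (by omega))
        have hdivM : pvM t off s / off = c - 1 := by
          apply Nat.div_eq_of_lt_le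
          · exact hprev
          · have hcc : (c - 1 + 1) * off = c * off := by
              have hc1 : c - 1 + 1 = c := by omega
              rw [hc1]
            omega
        have hdivB : c + 1 ≤ (t.length - s) / off := by
          rw [Nat.le_div_iff_mul_le hoff]
          omega
        have h2off : s + 2 * off ≤ t.length := by
          have : 2 * off ≤ (c + 1) * off := Nat.mul_le_mul_right off (by omega)
          omega
        have hspec : pvSpecLoop t off s
            = (if 1 < c then [(c : Int)] else []) ++ pvSpecLoop t off (s + (c - 1) * off + 1) := by
          rw [pvSpecLoop, if_pos h2off, hdivM]
          have hminq : min (c - 1) ((t.length - s) / off - 1) = c - 1 := by omega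
          rw [if_neg (by omega), hminq]
          have hone : 1 + (c - 1) = c := by omega
          rw [hone]
        rw [hspec]
        have hiB : (s : Int) + ((c : Int) + 1) * (off : Int) - (off : Int) + 1
            = ((s + (c - 1) * off + 1 : Nat) : Int) + ((off : Nat) : Int) := by
          push_cast [Nat.cast_sub (by omega : 1 ≤ c)]
          ring
        have hiC : (s : Int) + ((c : Int) + 1) * (off : Int) - (off : Int) + 1 - (off : Int)
            = ((s + (c - 1) * off + 1 : Nat) : Int) := by
          push_cast [Nat.cast_sub (by omega : 1 ≤ c)]
          ring
        have hrec := ih (s + (c - 1) * off + 1) 1 (if (c : Int) > 1 then acc ++ [(c : Int)] else acc)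
          (le_refl 1) (by simp) (by omega)
          (by
            have e2 : (c + 1) * off = (c - 1) * off + 2 * off := by
              have hc1 : c - 1 + 2 = c + 1 := by omega
              calc (c + 1) * off = (c - 1 + 2) * off := by rw [hc1]
                _ = (c - 1) * off + 2 * off := by ring
            have e1 : (1 + 1) * off = 2 * off := by ring
            omega)
        simp only [Nat.cast_one] at hrec
        rw [hiC, hiB,
          show ((s + (c - 1) * off + 1 : Nat) : Int) + ((off : Nat) : Int) + (off : Int)
            = ((s + (c - 1) * off + 1 : Nat) : Int) + ((1 : Int) + 1) * (off : Int) from by ring,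
          PySem.List.slice_natCast_add t _ _, hrec]
        have haccif : (if (c : Int) > 1 then acc ++ [(c : Int)] else acc)
            = acc ++ (if 1 < c then [(c : Int)] else []) := by
          by_cases h1c : 1 < c
          · rw [if_pos (by exact_mod_cast h1c), if_pos h1c]
          · rw [if_neg (by exact_mod_cast h1c), if_neg h1c]
            simp
        rw [haccif, List.append_assoc]
    · rw [pvALoop, if_neg (by
        have hQ : ((c : Int) + 1) * (off : Int) = ((c * off : Nat) : Int) + ((off : Nat) : Int) := by push_cast; ring
        have hP : (c + 1) * off = c * off + off := by ring
        omega)]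
      exact hexit s c acc hc hprev hfit hcont

-- ===== VERDICT (by name: the statement is the Claim_ definition above) =====
theorem get_repeat_record_by_offset_py_spec : Claim_equal_get_repeat_record_by_offset_py := by
  intro text offset hdom hpre
  unfold Spec_get_repeat_record_by_offset_py
  have hpos : 0 < offset := hpre
  obtain ⟨off, rfl⟩ : ∃ off : Nat, offset = (off : Int) :=
    ⟨offset.toNat, (Int.toNat_of_nonneg (le_of_lt hpos)).symm⟩
  have hoff : 1 ≤ off := by exact_mod_cast hpos
  set t := text.toList with ht
  rw [get_repeat_record_by_offset_py, get_repeat_record_by_offset_py_alt]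
  rw [runFold_eq t off hoff]
  have hB := pvBLoop_eq_spec t off hoff (t.length + 1) 0 [] (by omega)
  simp only [Nat.cast_zero, List.nil_append] at hB
  rw [hB]
  have hword : (if (t.length : Int) > 0 then PySem.List.slice t (some 0) (some (off : Int)) else [])
      = t.take off := by
    by_cases h0 : (t.length : Int) > 0
    · rw [if_pos h0, PySem.List.slice_zero_start, PySem.List.slice_to t (by omega)]
      simp
    · rw [if_neg h0]
      have ht0 : t = [] := by
        have : t.length = 0 := by omega
        exact List.eq_nil_of_length_eq_zero this
      simp [ht0]
  rw [hword]
  have hA := pvALoop_eq_spec t off hoff (t.length + 1) 0 1 [] (le_refl 1) (by simp) (by omega)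
    (by
      have e : (1 + 1) * off = 2 * off := by ring
      omega)
  simp only [Nat.cast_zero, Nat.cast_one, zero_add, List.drop_zero, List.nil_append] at hA
  rw [show ((off : Int) * 2) = ((1 : Int) + 1) * (off : Int) from by ring]
  exact hA
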